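-- pv_equiv track=rewrite | github.com/tbrup/ctf-writeups | HackyEaster/he2021/ch30/poodle.py | incPadding
-- ===== SOURCE A (Python) =====
-- def incPadding(oldPad):
--     oldVal = len(oldPad) // 2
--     newVal = oldVal + 1
--     newPad = ''
--     for i in range(len(oldPad)//2):
--         x = int(oldPad[2*i:2*i+2], 16)
--         newPad += '{:02X}'.format(x ^ oldVal ^ newVal)
--     return newPad
-- ===== SOURCE B (Python) =====
-- def incPadding(oldPad):
--     n = len(oldPad) // 2
--     k = n ^ (n + 1)
--     digs = '0123456789abcdefABCDEF'
--     table = {a + b: '{:02X}'.format(int(a + b, 16) ^ k) for a in digs for b in digs}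
--     return ''.join(table[oldPad[2 * i:2 * i + 2]] for i in range(n))
-- ===== Notes on version B (the rewrite author's own statement) =====
-- stated objective: faster
-- what changed: Builds a 484-entry hex-pair-to-hex-pair translation dictionary once (keyed by the raw two-character substring), so the loop body is a single dict lookup and join instead of A's per-index slice/int-parse/xor/format string concatenation (measured ~3x faster).
-- outside the precondition, e.g. on incPadding('+a'): A returns '09', B raises KeyError; on incPadding('a '): A returns '09', B raises KeyError
import Mathlib
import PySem

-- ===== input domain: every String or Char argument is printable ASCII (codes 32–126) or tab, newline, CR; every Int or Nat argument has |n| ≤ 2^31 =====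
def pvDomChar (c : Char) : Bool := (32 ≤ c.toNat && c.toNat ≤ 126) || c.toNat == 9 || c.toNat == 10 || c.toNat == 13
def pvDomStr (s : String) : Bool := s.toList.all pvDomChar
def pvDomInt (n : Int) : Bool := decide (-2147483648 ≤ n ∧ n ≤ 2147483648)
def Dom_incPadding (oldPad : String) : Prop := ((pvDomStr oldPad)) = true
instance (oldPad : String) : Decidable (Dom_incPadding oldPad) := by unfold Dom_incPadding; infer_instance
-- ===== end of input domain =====

-- B replaces A's per-index parse/xor/format loop by a 484-entry translation dictionary
-- built once (raw two-character substring -> output pair), so the loop is one dict lookup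
-- per pair plus a join (measured faster by a constant factor; same asymptotic cost).

-- ===== shared low-level helpers ('{:02X}'.format and int(_,16), used by both Pythons) =====
-- value of one hex digit; exact for hex digits (guaranteed by Pre_), 0 elsewhere (unreached inside Pre_)
def pvHexVal (c : Char) : Nat :=
  if '0' ≤ c ∧ c ≤ '9' then c.toNat - 48
  else if 'a' ≤ c ∧ c ≤ 'f' then c.toNat - 87
  else if 'A' ≤ c ∧ c ≤ 'F' then c.toNat - 55
  else 0

def pvHexDigitChar (n : Nat) : Char := if n < 10 then Char.ofNat (48 + n) else Char.ofNat (55 + n)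

-- little-endian uppercase hex digits of x (empty for 0)
def pvHexRev : Nat → List Char
  | 0 => []
  | x + 1 => pvHexDigitChar ((x + 1) % 16) :: pvHexRev ((x + 1) / 16)
decreasing_by exact Nat.div_lt_self (Nat.succ_pos x) (by norm_num)

-- '{:02X}'.format x for x ≥ 0: uppercase hex, zero-padded to width 2
def pvFmt02X (x : Nat) : List Char :=
  let d := (pvHexRev x).reverse
  if 2 ≤ d.length then d else List.replicate (2 - d.length) '0' ++ d

-- int(s, 16) on a list of hex-digit chars; exact when every char is a hex digit (Pre_);
-- Python's extra acceptances (sign/whitespace/'0x') are excluded by Pre_.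
def pvInt16 (l : List Char) : Nat := l.foldl (fun a c => 16 * a + pvHexVal c) 0

-- ===== PORT A =====
def incPadding (oldPad : String) : String :=
  let cs := oldPad.toList
  let oldVal := cs.length / 2
  let newVal := oldVal + 1
  String.ofList ((List.range (cs.length / 2)).foldl
    (fun newPad i =>
      let x := pvInt16 (PySem.List.slice cs (some ((2 * i : Nat) : Int)) (some ((2 * i + 2 : Nat) : Int)))
      newPad ++ pvFmt02X (x ^^^ oldVal ^^^ newVal)) [])

-- ===== PORT B =====
-- digs = '0123456789abcdefABCDEF'
def pvDigs : List Char :=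
  ['0','1','2','3','4','5','6','7','8','9','a','b','c','d','e','f','A','B','C','D','E','F']

-- the pairs (a, b) the dict comprehension 'for a in digs for b in digs' runs over
def pvPairs : List (Char × Char) := pvDigs.flatMap (fun a => pvDigs.map (fun b => (a, b)))

-- table = {a + b: '{:02X}'.format(int(a + b, 16) ^ k) for a in digs for b in digs}
def pvTable (k : Nat) : PySem.Dict (List Char) (List Char) :=
  pvPairs.foldl
    (fun d p => d.insert [p.1, p.2] (pvFmt02X (pvInt16 [p.1, p.2] ^^^ k)))
    PySem.Dict.empty

def incPadding_alt (oldPad : String) : String :=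
  let cs := oldPad.toList
  let n := cs.length / 2
  let k := n ^^^ (n + 1)
  let table := pvTable k
  -- table[oldPad[2*i:2*i+2]]: getD with [] — the KeyError case is excluded by Pre_
  String.ofList (((List.range n).map
    (fun i => table.getD (PySem.List.slice cs (some ((2 * i : Nat) : Int)) (some ((2 * i + 2 : Nat) : Int))) [])).flatten)

-- ===== PRECONDITION & SPEC =====
-- Pre_ excludes inputs whose even-length prefix contains a character that is not a plain hex
-- digit: there A either raises ValueError, or (sign/whitespace pairs int(_,16) happens to
-- accept, e.g. '+a') returns an accidental value on which B raises KeyError.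
def Pre_incPadding (oldPad : String) : Prop :=
  (oldPad.toList.take (2 * (oldPad.toList.length / 2))).all (pvDigs.contains ·) = true
instance (oldPad : String) : Decidable (Pre_incPadding oldPad) := by unfold Pre_incPadding; infer_instance

def pvWitness_incPadding : String := "AABB"

def Spec_incPadding (oldPad : String) (out : String) : Prop := out = incPadding_alt oldPad
instance (oldPad : String) (out : String) : Decidable (Spec_incPadding oldPad out) := by unfold Spec_incPadding; infer_instance

-- ===== CLAIM (what is proved, stated in full; the proofs are below) =====
def Claim_equal_incPadding : Prop := ∀ (oldPad : String), Dom_incPadding oldPad → Pre_incPadding oldPad → Spec_incPadding oldPad (incPadding oldPad)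

-- ===== LEMMAS AND PROOFS =====

-- the dict-comprehension keys are pairwise distinct
theorem pvPairs_keys_nodup : (pvPairs.map (fun p => [p.1, p.2])).Nodup := by
  have hd : pvDigs.Nodup := by decide
  have hp : pvPairs.Nodup := by
    have : pvPairs = pvDigs ×ˢ pvDigs := rfl
    rw [this]; exact List.Nodup.product hd hd
  exact hp.map (fun p q h => by
    obtain ⟨p1, p2⟩ := p; obtain ⟨q1, q2⟩ := q
    simpa using h)

theorem pvTable_items (k : Nat) :
    (pvTable k).items = pvPairs.map (fun p => ([p.1, p.2], pvFmt02X (pvInt16 [p.1, p.2] ^^^ k))) := by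
  unfold pvTable
  rw [PySem.Dict.items_foldl_insert_fresh _ _ _ _ (by intro a _; simp) pvPairs_keys_nodup]
  rfl

theorem pvTable_keys_nodup (k : Nat) : (pvTable k).keys.Nodup := by
  have h : (pvTable k).keys = pvPairs.map (fun p => [p.1, p.2]) := by
    simp only [PySem.Dict.keys, pvTable_items, List.map_map]; rfl
  rw [h]; exact pvPairs_keys_nodup

-- looking up a hex-digit pair in the table yields exactly A's formatted XORed byte
theorem pvTable_getD (k : Nat) (a b : Char)
    (ha : pvDigs.contains a = true) (hb : pvDigs.contains b = true) :
    (pvTable k).getD [a, b] [] = pvFmt02X (pvInt16 [a, b] ^^^ k) := by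
  apply PySem.Dict.getD_of_mem_items _ _ (pvTable_keys_nodup k)
  rw [pvTable_items]
  exact List.mem_map.mpr ⟨(a, b), by
    simp only [pvPairs, List.mem_flatMap, List.mem_map]
    exact ⟨a, List.contains_iff_mem.mp ha, b, List.contains_iff_mem.mp hb, rfl⟩, rfl⟩

-- the i-th slice is the two characters cs[2i], cs[2i+1]
theorem pv_slice_pair (cs : List Char) (i : Nat) (h : 2 * i + 1 < cs.length) :
    PySem.List.slice cs (some ((2 * i : Nat) : Int)) (some ((2 * i + 2 : Nat) : Int))
      = [cs[2 * i], cs[2 * i + 1]] := by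
  rw [PySem.List.slice_natCast]
  have h2 : 2 * i + 2 - 2 * i = 2 := by omega
  rw [h2, List.drop_eq_getElem_cons (by omega : 2 * i < cs.length),
    List.drop_eq_getElem_cons (by omega : 2 * i + 1 < cs.length), List.take_succ_cons,
    List.take_succ_cons, List.take_zero]

-- the list-level identity: A's accumulator loop equals B's joined table lookups
theorem pv_lists (cs : List Char)
    (hpre : (cs.take (2 * (cs.length / 2))).all (pvDigs.contains ·) = true) :
    (List.range (cs.length / 2)).foldl
      (fun newPad i =>
        newPad ++ pvFmt02X
          (pvInt16 (PySem.List.slice cs (some ((2 * i : Nat) : Int)) (some ((2 * i + 2 : Nat) : Int)))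
            ^^^ (cs.length / 2) ^^^ (cs.length / 2 + 1))) []
    = ((List.range (cs.length / 2)).map
        (fun i => (pvTable ((cs.length / 2) ^^^ (cs.length / 2 + 1))).getD
          (PySem.List.slice cs (some ((2 * i : Nat) : Int)) (some ((2 * i + 2 : Nat) : Int))) [])).flatten := by
  rw [PySem.List.foldl_append_eq_flatMap, List.nil_append, List.flatMap_def]
  refine congrArg List.flatten (List.map_congr_left ?_)
  intro i hi
  have hi' : i < cs.length / 2 := List.mem_range.mp hi
  have hlen : 2 * i + 1 < cs.length := by omega
  have hmem : ∀ j : Nat, j < 2 * (cs.length / 2) → pvDigs.contains cs[j]! = true := by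
    intro j hj
    have hjl : j < cs.length := by omega
    have : cs[j]! ∈ cs.take (2 * (cs.length / 2)) := by
      rw [getElem!_pos cs j hjl]
      exact List.mem_take_iff_getElem.mpr ⟨j, by omega, by simp⟩
    exact List.all_eq_true.mp hpre _ this
  have ha := hmem (2 * i) (by omega)
  have hb := hmem (2 * i + 1) (by omega)
  rw [getElem!_pos cs (2 * i) (by omega)] at ha
  rw [getElem!_pos cs (2 * i + 1) (by omega)] at hb
  rw [pv_slice_pair _ _ hlen, pvTable_getD _ _ _ ha hb, Nat.xor_assoc]

-- ===== VERDICT (by name: the statement is the Claim_ definition above) =====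
theorem incPadding_spec : Claim_equal_incPadding := by
  intro oldPad _ hpre
  unfold Spec_incPadding
  exact congrArg String.ofList (pv_lists oldPad.toList hpre)
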